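-- pv_equiv track=rewrite | github.com/isabalyas/lab2 | python/ex2.py | transform_email
-- ===== SOURCE A (Python) =====
-- def transform_email(input_email):
--     if input_email[0] == '.':
--         return ""
--
--     result = []
--     i = 0
--
--     while i < len(input_email) and input_email[i] != '@':
--         if input_email[i] == '+':
--             while i + 1 < len(input_email) and input_email[i + 1] != '@':
--                 i += 1
--         elif input_email[i].isdigit() or input_email[i].isalpha():
--             result.append(input_email[i])
--         i += 1
--
--     if i > 0 and input_email[i-1] == '.':
--         return ""
--
--     if len(result) < 6 or len(result) > 30:
--         return ""
--
--     while i < len(input_email):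
--         result.append(input_email[i])
--         i += 1
--
--     return ''.join(result)
-- ===== SOURCE B (Python) =====
-- def transform_email(input_email):
--     if input_email[0] == '.':
--         return ""
--     at = input_email.find('@')
--     end = at if at != -1 else len(input_email)
--     local = input_email[:end]
--     plus = local.find('+')
--     prefix = local[:plus] if plus != -1 else local
--     result = [c for c in prefix if c.isalnum()]
--     if end > 0 and input_email[end - 1] == '.':
--         return ""
--     if len(result) < 6 or len(result) > 30:
--         return ""
--     return ''.join(result) + input_email[end:]
-- ===== Notes on version B (the rewrite author's own statement) =====
-- stated objective: simpler
-- what changed: Replaces the stateful index loop with a nested skip-while by find/slice passes: locate the first '@', cut the local part at its first '+', filter alphanumerics with a comprehension, then apply the same guards.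
-- outside the precondition, e.g. on transform_email(''): A raises IndexError, B raises IndexError
import Mathlib
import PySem

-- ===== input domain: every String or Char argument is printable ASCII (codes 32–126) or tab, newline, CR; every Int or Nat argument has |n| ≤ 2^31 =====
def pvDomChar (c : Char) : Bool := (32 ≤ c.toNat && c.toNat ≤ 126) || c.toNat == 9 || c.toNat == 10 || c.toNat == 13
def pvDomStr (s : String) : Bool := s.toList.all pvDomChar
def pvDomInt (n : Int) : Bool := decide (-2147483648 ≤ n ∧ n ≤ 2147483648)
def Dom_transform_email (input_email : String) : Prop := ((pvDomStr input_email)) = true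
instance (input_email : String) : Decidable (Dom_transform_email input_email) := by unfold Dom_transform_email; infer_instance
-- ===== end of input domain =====

-- B replaces A's stateful index loop (with a nested skip-while after '+') by find/slice/filter passes; objective: simpler.
-- A raises IndexError on the empty string (input_email[0]); Pre_ excludes exactly that input (B raises there too).


-- ===== PORT A =====
-- inner while: 'while i + 1 < len and input_email[i+1] != '@': i += 1'
def skipPlusA (cs : List Char) (i : Nat) : Nat :=
  if _h : i + 1 < cs.length then
    if cs.getD (i + 1) ' ' ≠ '@' then skipPlusA cs (i + 1) else i
  else i
termination_by cs.length - i

theorem skipPlusA_ge (cs : List Char) (i : Nat) : i ≤ skipPlusA cs i := by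
  unfold skipPlusA
  split
  · split
    · exact le_trans (Nat.le_succ i) (skipPlusA_ge cs (i + 1))
    · exact le_refl i
  · exact le_refl i
termination_by cs.length - i

-- outer while: collects alnum chars of the local part, skipping from '+'
def scanA (cs : List Char) (i : Nat) (res : List Char) : Nat × List Char :=
  if _h : i < cs.length then
    let c := cs.getD i ' '
    if c = '@' then (i, res)
    else if c = '+' then scanA cs (skipPlusA cs i + 1) res
    else if c.isDigit || c.isAlpha then scanA cs (i + 1) (res ++ [c])
    else scanA cs (i + 1) res
  else (i, res)
termination_by cs.length - i
decreasing_by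
  · have := skipPlusA_ge cs i; omega
  · omega
  · omega

def transform_email (input_email : String) : String :=
  let cs := input_email.toList
  if cs.headD ' ' = '.' then "" else
  let p := scanA cs 0 []
  let i := p.1
  let result := p.2
  if 0 < i ∧ cs.getD (i - 1) ' ' = '.' then "" else
  if result.length < 6 ∨ result.length > 30 then "" else
  String.mk (result ++ cs.drop i)

-- ===== PORT B =====
def transform_email_alt (input_email : String) : String :=
  let cs := input_email.toList
  if cs.headD ' ' = '.' then "" else
  -- at = input_email.find('@'); end = at if at != -1 else len(input_email)
  let e := match cs.idxOf? '@' with | some k => k | none => cs.length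
  let loc := cs.take e
  -- plus = local.find('+'); prefix = local[:plus] if plus != -1 else local
  let pre := match loc.idxOf? '+' with | some p => loc.take p | none => loc
  let result := pre.filter (fun c => c.isDigit || c.isAlpha)
  if 0 < e ∧ cs.getD (e - 1) ' ' = '.' then "" else
  if result.length < 6 ∨ result.length > 30 then "" else
  String.mk (result ++ cs.drop e)

-- ===== PRECONDITION & SPEC =====
-- A evaluates input_email[0] first and raises IndexError on the empty string; Pre_ excludes exactly "".
def Pre_transform_email (input_email : String) : Prop := input_email ≠ ""
instance (input_email : String) : Decidable (Pre_transform_email input_email) := by unfold Pre_transform_email; infer_instance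
def pvWitness_transform_email : String := "abcdef@x.com"

def Spec_transform_email (input_email : String) (out : String) : Prop := out = transform_email_alt input_email
instance (input_email : String) (out : String) : Decidable (Spec_transform_email input_email out) := by unfold Spec_transform_email; infer_instance

-- ===== CLAIM (what is proved, stated in full; the proofs are below) =====
def Claim_equal_transform_email : Prop := ∀ (input_email : String), Dom_transform_email input_email → Pre_transform_email input_email → Spec_transform_email input_email (transform_email input_email)

-- ===== LEMMAS AND PROOFS =====

-- spec-level recursion on the suffix: first-'@' index and collected characters
def collectC (l : List Char) : List Char :=
  match l with
  | [] => []
  | c :: t =>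
    if c = '@' then [] else if c = '+' then []
    else (if c.isDigit || c.isAlpha then [c] else []) ++ collectC t

theorem getElem_of_drop (cs : List Char) (i : Nat) (c : Char) (t : List Char)
    (h : cs.drop i = c :: t) (hi : i < cs.length) : cs[i]'hi = c := by
  have h0 : (List.drop i cs)[0]'(by rw [h]; simp) = c := by simp [h]
  simpa using h0

theorem skipPlusA_drop (cs : List Char) (i : Nat) (c : Char) (t : List Char)
    (h : cs.drop i = c :: t) : skipPlusA cs i = i + t.idxOf '@' := by
  induction t generalizing i c with
  | nil =>
    unfold skipPlusA
    have hlen : cs.length = i + 1 := by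
      have := congrArg List.length h
      simp [List.length_drop] at this
      omega
    simp [hlen]
  | cons d t' ih =>
    have hlen : i + 1 < cs.length := by
      have := congrArg List.length h
      simp [List.length_drop] at this
      omega
    have hd : cs.drop (i + 1) = d :: t' := by
      have := congrArg List.tail h
      simpa [List.tail_drop] using this
    have hg : cs[i + 1]'hlen = d := getElem_of_drop cs (i + 1) d t' hd hlen
    unfold skipPlusA
    by_cases hat : d = '@'
    · simp [hlen, hg, hat]
    · rw [dif_pos hlen, List.getD_eq_getElem cs ' ' hlen, hg, if_pos hat]
      rw [ih (i + 1) d hd]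
      have : List.idxOf '@' (d :: t') = t'.idxOf '@' + 1 := by simp [List.idxOf_cons, hat]
      omega

theorem scanA_eq (cs : List Char) (d : List Char) (i : Nat) (res : List Char)
    (hd : cs.drop i = d) :
    scanA cs i res = (i + d.idxOf '@', res ++ collectC d) := by
  induction d generalizing i res with
  | nil =>
    have hlen : cs.length ≤ i := by
      have := congrArg List.length hd
      simp [List.length_drop] at this
      omega
    unfold scanA
    simp [Nat.not_lt.mpr hlen, collectC, List.idxOf]
  | cons c t ih =>
    have hlen : i < cs.length := by
      have := congrArg List.length hd
      simp [List.length_drop] at this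
      omega
    have hg : cs[i]'hlen = c := getElem_of_drop cs i c t hd hlen
    have hdt : cs.drop (i + 1) = t := by
      have := congrArg List.tail hd
      simpa [List.tail_drop] using this
    have hlent : cs.length = i + 1 + t.length := by
      have := congrArg List.length hdt
      simp [List.length_drop] at this
      omega
    unfold scanA
    rw [dif_pos hlen]
    simp only [List.getD_eq_getElem cs ' ' hlen, hg]
    by_cases hat : c = '@'
    · simp [hat, collectC]
    · rw [if_neg hat]
      have hid : List.idxOf '@' (c :: t) = t.idxOf '@' + 1 := by simp [List.idxOf_cons, hat]
      by_cases hpl : c = '+'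
      · rw [if_pos hpl, skipPlusA_drop cs i c t hd]
        have hc0 : collectC (c :: t) = [] := by
          rw [collectC.eq_def]
          simp [hat, hpl]
        by_cases hmem : '@' ∈ t
        · have hk : t.idxOf '@' < t.length := List.idxOf_lt_length_of_mem hmem
          have hlen2 : i + t.idxOf '@' + 1 < cs.length := by omega
          have hgat : cs[i + t.idxOf '@' + 1]'hlen2 = '@' := by
            have h2 : (cs.drop (i + 1))[t.idxOf '@']'(by simp [hdt, hk]) = '@' := by
              simp only [hdt]
              exact List.getElem_idxOf hk
            simpa [show (i + 1) + t.idxOf '@' = i + t.idxOf '@' + 1 by omega] using h2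
          unfold scanA
          rw [dif_pos hlen2]
          simp only [List.getD_eq_getElem cs ' ' hlen2, hgat, if_pos rfl]
          rw [hid, hc0]
          simp [Prod.ext_iff]
          all_goals omega
        · have hidx : t.idxOf '@' = t.length := List.idxOf_eq_length hmem
          unfold scanA
          rw [dif_neg (by omega)]
          rw [hid, hidx, hc0]
          simp [Prod.ext_iff]
          all_goals omega
      · rw [if_neg hpl]
        by_cases hal : (c.isDigit || c.isAlpha) = true
        · rw [if_pos hal, ih (i + 1) (res ++ [c]) hdt, hid]
          have hc : collectC (c :: t) = c :: collectC t := by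
            rw [collectC.eq_def]
            simp [hat, hpl, hal]
          rw [hc]
          simp [Prod.ext_iff]
          all_goals omega
        · rw [if_neg hal, ih (i + 1) res hdt, hid]
          have hc : collectC (c :: t) = collectC t := by
            rw [collectC.eq_def]
            simp [hat, hpl, hal]
          rw [hc]
          simp [Prod.ext_iff]
          all_goals omega

-- B's prefix computation equals collectC after filtering
theorem collectC_eq (l : List Char) :
    (let e := match l.idxOf? '@' with | some k => k | none => l.length
     let loc := l.take e
     let pre := match loc.idxOf? '+' with | some p => loc.take p | none => loc
     pre.filter (fun c => c.isDigit || c.isAlpha)) = collectC l := by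
  induction l with
  | nil => simp [collectC]
  | cons c t ih =>
    by_cases hat : c = '@'
    · simp [collectC, hat, List.idxOf?_cons]
    · by_cases hpl : c = '+'
      · subst hpl
        simp only [collectC, if_neg hat, if_pos rfl]
        cases h : List.idxOf? '@' ('+' :: t) with
        | none =>
          simp only [h]
          rw [List.take_length]
          simp [List.idxOf?_cons]
        | some k =>
          simp only [h]
          have hk : k ≠ 0 := by
            intro h0
            subst h0
            rw [List.idxOf?_cons] at h
            simp only [show (('+' : Char) == '@') = false from rfl, Bool.false_eq_true,
              if_false] at h
            cases h' : List.idxOf? '@' t <;> simp [h'] at h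
          obtain ⟨k', rfl⟩ := Nat.exists_eq_succ_of_ne_zero hk
          simp [List.take_succ_cons, List.idxOf?_cons]
      · simp only [collectC, if_neg hat, if_neg hpl]
        rw [List.idxOf?_cons]
        simp only [beq_iff_eq, hat, if_false, ite_false, if_neg hat]
        rw [← ih]
        cases h : List.idxOf? '@' t with
        | none =>
          simp only [h, Option.map_none]
          rw [show (c :: t).length = t.length + 1 from rfl, List.take_succ_cons,
            List.idxOf?_cons]
          simp only [beq_iff_eq, if_neg hpl]
          cases h2 : List.idxOf? '+' (List.take t.length t) with
          | none =>
            simp only [h2, Option.map_none, List.filter_cons]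
            by_cases hc : (c.isDigit || c.isAlpha) = true <;> simp [hc]
          | some p =>
            simp only [h2, Option.map_some, List.take_succ_cons, List.filter_cons]
            by_cases hc : (c.isDigit || c.isAlpha) = true <;> simp [hc]
        | some k =>
          simp only [h, Option.map_some, List.take_succ_cons, List.idxOf?_cons]
          simp only [beq_iff_eq, if_neg hpl]
          cases h2 : List.idxOf? '+' (List.take k t) with
          | none =>
            simp only [h2, Option.map_none, List.filter_cons]
            by_cases hc : (c.isDigit || c.isAlpha) = true <;> simp [hc]
          | some p =>
            simp only [h2, Option.map_some, List.take_succ_cons, List.filter_cons]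
            by_cases hc : (c.isDigit || c.isAlpha) = true <;> simp [hc]

theorem idxOf?_match_eq (l : List Char) :
    (match l.idxOf? '@' with | some k => k | none => l.length) = l.idxOf '@' := by
  cases h : l.idxOf? '@' with
  | none =>
    have : '@' ∉ l := List.idxOf?_eq_none_iff.mp h
    simp [List.idxOf_eq_length this]
  | some k =>
    rw [List.idxOf_eq_getD_idxOf?, h]
    rfl

-- ===== VERDICT (by name: the statement is the Claim_ definition above) =====
theorem transform_email_spec : Claim_equal_transform_email := by
  intro s _ _
  unfold Spec_transform_email transform_email transform_email_alt
  have hscan := scanA_eq s.toList s.toList 0 [] (by simp)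
  have hcoll := collectC_eq s.toList
  have hidx := idxOf?_match_eq s.toList
  simp only [hscan]
  simp only [hidx] at hcoll ⊢
  rw [hcoll]
  simp
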